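-- pv_equiv track=rewrite | github.com/deltawi/deltallm | src/middleware/rate_limit.py | _model_limit
-- ===== SOURCE A (Python) =====
-- def _model_limit(limits: dict[str, int] | None, model: str | None) -> int | None:
--     if limits is None or not model:
--         return None
--     exact = limits.get(model)
--     if exact is not None:
--         try:
--             v = int(exact)
--             return v if v > 0 else None
--         except (TypeError, ValueError):
--             return None
--     best_match: tuple[int, int | None] = (-1, None)
--     for pattern, value in limits.items():
--         if pattern.endswith("*"):
--             prefix = pattern[:-1]
--             if model.startswith(prefix) and len(prefix) > best_match[0]:
--                 try:
--                     v = int(value)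
--                     best_match = (len(prefix), v if v > 0 else None)
--                 except (TypeError, ValueError):
--                     pass
--     return best_match[1] if best_match[0] >= 0 else None
-- ===== SOURCE B (Python) =====
-- def _model_limit(limits, model):
--     if limits is None or not model:
--         return None
--     exact = limits.get(model)
--     if exact is not None:
--         try:
--             v = int(exact)
--             return v if v > 0 else None
--         except (TypeError, ValueError):
--             return None
--     # longest-prefix match by direct key lookup: walk prefixes of the model
--     # from longest to shortest and probe "<prefix>*" in the dict
--     for k in range(len(model), -1, -1):
--         value = limits.get(model[:k] + "*")
--         if value is None:
--             continue
--         try: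
--             v = int(value)
--         except (TypeError, ValueError):
--             continue
--         return v if v > 0 else None
--     return None
-- ===== Notes on version B (the rewrite author's own statement) =====
-- stated objective: alternative
-- what changed: Replaces A's scan over all patterns with a longest-prefix-match by dict lookup: B walks prefixes of the model from longest to shortest and probes '<prefix>*' as a key, so no pattern scan and no best-match accumulator exist; cost becomes O(|model|) lookups instead of O(#patterns) string tests.
import Mathlib
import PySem

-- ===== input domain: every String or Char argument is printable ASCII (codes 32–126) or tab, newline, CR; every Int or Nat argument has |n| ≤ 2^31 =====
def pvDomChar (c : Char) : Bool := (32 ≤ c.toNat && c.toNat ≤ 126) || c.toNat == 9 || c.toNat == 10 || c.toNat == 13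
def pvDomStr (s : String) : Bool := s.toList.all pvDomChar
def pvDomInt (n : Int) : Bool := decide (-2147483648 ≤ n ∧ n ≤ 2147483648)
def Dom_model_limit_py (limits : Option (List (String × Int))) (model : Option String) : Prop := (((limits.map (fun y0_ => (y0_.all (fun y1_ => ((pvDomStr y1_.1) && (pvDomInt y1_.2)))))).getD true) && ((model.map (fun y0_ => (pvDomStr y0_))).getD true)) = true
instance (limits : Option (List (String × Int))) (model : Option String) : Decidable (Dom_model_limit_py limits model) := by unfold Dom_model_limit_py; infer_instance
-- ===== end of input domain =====

-- B replaces A's scan over the pattern list with a longest-prefix match done by key lookup: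
-- it walks prefixes of the model from longest to shortest probing "<prefix>*" (objective: alternative algorithm).


-- ===== PORT A =====
-- A's wildcard loop body: keep the running (best prefix length, value) accumulator
def pvStepA (m : String) (best : Int × Option Int) (pv : String × Int) : Int × Option Int :=
  if PySem.Str.endswith pv.1 "*" then
    let pre := PySem.Str.slice pv.1 none (some (-1))
    if PySem.Str.startswith m pre && decide (best.1 < PySem.Str.len pre) then
      (PySem.Str.len pre, if pv.2 > 0 then some pv.2 else none)
    else best
  else best

def model_limit_py (limits : Option (List (String × Int))) (model : Option String) : Option Int :=
  match limits, model with
  | none, _ => none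
  | some _, none => none
  | some lst, some m =>
    if m = "" then none
    else
      match (lst.find? (fun p => p.1 == m)).map Prod.snd with
      | some ex => if ex > 0 then some ex else none   -- int(ex) never fails: ex is an int
      | none =>
        let best := lst.foldl (pvStepA m) (-1, none)
        if best.1 ≥ 0 then best.2 else none

-- ===== PORT B =====
-- B's probe key for prefix length k: model[:k] + "*"
def pvKey (m : String) (k : Nat) : String := PySem.Str.slice m none (some (k : Int)) ++ "*"

-- B's descending loop: for k in range(len(model), -1, -1): probe limits.get(model[:k]+"*")
def pvDescend (lst : List (String × Int)) (m : String) : Nat → Option Int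
  | 0 =>
    match lst.find? (fun p => p.1 == pvKey m 0) with
    | some pv => if pv.2 > 0 then some pv.2 else none   -- int(value) never fails: value is an int
    | none => none
  | k + 1 =>
    match lst.find? (fun p => p.1 == pvKey m (k + 1)) with
    | some pv => if pv.2 > 0 then some pv.2 else none
    | none => pvDescend lst m k

def model_limit_py_alt (limits : Option (List (String × Int))) (model : Option String) : Option Int :=
  match limits, model with
  | none, _ => none
  | some _, none => none
  | some lst, some m =>
    if m = "" then none
    else
      match (lst.find? (fun p => p.1 == m)).map Prod.snd with
      | some ex => if ex > 0 then some ex else none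
      | none => pvDescend lst m (PySem.Str.len m).toNat

-- ===== PRECONDITION & SPEC =====
def Spec_model_limit_py (limits : Option (List (String × Int))) (model : Option String) (out : Option Int) : Prop := out = model_limit_py_alt limits model
instance (limits : Option (List (String × Int))) (model : Option String) (out : Option Int) : Decidable (Spec_model_limit_py limits model out) := by unfold Spec_model_limit_py; infer_instance

-- ===== CLAIM =====
def Claim_equal_model_limit_py : Prop := ∀ (limits : Option (List (String × Int))) (model : Option String), Dom_model_limit_py limits model → Spec_model_limit_py limits model (model_limit_py limits model)

-- ===== LEMMAS AND PROOFS =====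

-- proof-only: the candidate a wildcard entry contributes (prefix length, normalized value)
def pvCand (m : String) (pv : String × Int) : Option (Int × Option Int) :=
  if PySem.Str.endswith pv.1 "*" then
    let pre := PySem.Str.slice pv.1 none (some (-1))
    if PySem.Str.startswith m pre then
      some (PySem.Str.len pre, if pv.2 > 0 then some pv.2 else none)
    else none
  else none

-- proof-only: the "keep the first maximum" step
def pvStep2 (b c : Int × Option Int) : Int × Option Int := if b.1 < c.1 then c else b

theorem stepA_eq (m : String) (acc : Int × Option Int) (pv : String × Int) :
    pvStepA m acc pv = (match pvCand m pv with | none => acc | some c => pvStep2 acc c) := by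
  by_cases he : PySem.Chars.endswith pv.1.toList ['*'] <;>
  by_cases hs : PySem.Chars.startswith m.toList (PySem.List.slice pv.1.toList none (some (-1))) <;>
  by_cases hlt : acc.1 < ((PySem.List.slice pv.1.toList none (some (-1))).length : Int) <;>
  simp [pvStepA, pvCand, pvStep2, he, hs, hlt]

theorem foldA_eq_fold_cands (m : String) (lst : List (String × Int)) (acc : Int × Option Int) :
    lst.foldl (pvStepA m) acc = (lst.filterMap (pvCand m)).foldl pvStep2 acc := by
  induction lst generalizing acc with
  | nil => rfl
  | cons pv rest ih =>
    simp only [List.foldl_cons, List.filterMap_cons, stepA_eq]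
    rcases pvCand m pv with _ | c
    · exact ih acc
    · simp only [List.foldl_cons]
      exact ih (pvStep2 acc c)

theorem cand_fst_nonneg (m : String) (pv : String × Int) (c : Int × Option Int)
    (h : pvCand m pv = some c) : 0 ≤ c.1 := by
  by_cases he : PySem.Chars.endswith pv.1.toList ['*'] <;>
  by_cases hs : PySem.Chars.startswith m.toList (PySem.List.slice pv.1.toList none (some (-1))) <;>
  simp [pvCand, he, hs] at h
  subst h
  exact Int.natCast_nonneg _

theorem cand_fst_le (m : String) (pv : String × Int) (c : Int × Option Int)
    (h : pvCand m pv = some c) : c.1 ≤ (m.toList.length : Int) := by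
  by_cases he : PySem.Chars.endswith pv.1.toList ['*'] <;>
  by_cases hs : PySem.Chars.startswith m.toList (PySem.List.slice pv.1.toList none (some (-1))) <;>
  simp [pvCand, he, hs] at h
  subst h
  have := (PySem.Chars.startswith_iff m.toList _).mp hs
  have hle := this.length_le
  simp only []
  omega

theorem key_toList (m : String) (k : Nat) : (pvKey m k).toList = m.toList.take k ++ ['*'] := by
  simp [pvKey, PySem.List.slice_to_natCast]

theorem cand_of_key (m : String) (pv : String × Int) (k : Nat)
    (hk : k ≤ m.toList.length) (h : pv.1.toList = m.toList.take k ++ ['*']) :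
    pvCand m pv = some ((k : Int), if pv.2 > 0 then some pv.2 else none) := by
  have he : PySem.Chars.endswith pv.1.toList ['*'] = true := by
    rw [PySem.Chars.endswith_iff, h]; exact List.suffix_append _ _
  have hsl : PySem.List.slice pv.1.toList none (some (-1)) = m.toList.take k := by
    rw [PySem.List.slice_to_neg_one, h, List.dropLast_concat]
  have hs : PySem.Chars.startswith m.toList (PySem.List.slice pv.1.toList none (some (-1))) = true := by
    rw [hsl, PySem.Chars.startswith_iff]; exact List.take_prefix _ _
  have hs' : PySem.Chars.startswith m.toList (List.take k m.toList) = true := by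
    rw [PySem.Chars.startswith_iff]; exact List.take_prefix _ _
  have hk' : k ≤ m.length := by
    have h2 : m.toList.length = m.length := String.length_toList
    omega
  simp [pvCand, he, hsl, hs', hk', List.length_take]

theorem key_of_cand (m : String) (pv : String × Int) (c : Int × Option Int) (k : Nat)
    (h : pvCand m pv = some c) (hc : c.1 = (k : Int)) :
    pv.1.toList = m.toList.take k ++ ['*'] := by
  by_cases he : PySem.Chars.endswith pv.1.toList ['*'] <;>
  by_cases hs : PySem.Chars.startswith m.toList (PySem.List.slice pv.1.toList none (some (-1))) <;>
  simp [pvCand, he, hs] at h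
  have hsuf := (PySem.Chars.endswith_iff pv.1.toList ['*']).mp he
  obtain ⟨ys, hys⟩ := hsuf
  have hdl : PySem.List.slice pv.1.toList none (some (-1)) = ys := by
    rw [PySem.List.slice_to_neg_one, ← hys, List.dropLast_concat]
  have hpre := (PySem.Chars.startswith_iff m.toList _).mp hs
  rw [hdl] at hpre
  have hlen : ys.length = k := by
    have : c.1 = (ys.length : Int) := by rw [← h]; simp [hdl]
    omega
  have : ys = m.toList.take k := by
    rw [← hlen]; exact List.prefix_iff_eq_take.mp hpre
  rw [← hys, this]

-- find? commutes with a filter the predicate implies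
theorem find?_filter_of_imp {α : Type} (l : List α) (p f : α → Bool)
    (h : ∀ x, p x = true → f x = true) : (l.filter f).find? p = l.find? p := by
  induction l with
  | nil => rfl
  | cons a t ih =>
    by_cases hp : p a
    · have := h a hp
      simp [this, hp]
    · by_cases hf : f a <;> simp [hf, hp, ih]

-- the find? correspondence: first candidate of length k = first entry with key model[:k]+"*"
theorem find?_corr (m : String) (lst : List (String × Int)) (k : Nat) (hk : k ≤ m.toList.length) :
    (lst.filterMap (pvCand m)).find? (fun c => c.1 == (k : Int))
      = (lst.find? (fun p => p.1 == pvKey m k)).map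
          (fun pv => ((k : Int), if pv.2 > 0 then some pv.2 else none)) := by
  induction lst with
  | nil => rfl
  | cons pv rest ih =>
    by_cases hkey : pv.1 = pvKey m k
    · have hl : pv.1.toList = m.toList.take k ++ ['*'] := by rw [hkey]; exact key_toList m k
      have hc := cand_of_key m pv k hk hl
      simp [hc, hkey]
    · have hne : (pv.1 == pvKey m k) = false := by simp [hkey]
      rcases hc : pvCand m pv with _ | c
      · simp [hc, hne, ih]
      · have hcne : (c.1 == (k : Int)) = false := by
          by_contra hcontra
          have hck : c.1 = (k : Int) := by
            cases hb : (c.1 == (k : Int)) with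
            | false => exact absurd hb hcontra
            | true => exact beq_iff_eq.mp hb
          have := key_of_cand m pv c k hc hck
          have : pv.1 = pvKey m k := by
            apply String.toList_injective ∘ (fun h => h) <| by rw [this, key_toList]
          exact hkey this
        simp [hc, hcne, hne, ih]

-- the fold is inert once nothing exceeds the accumulator
theorem fold_stay (cs : List (Int × Option Int)) (acc : Int × Option Int)
    (h : ∀ x ∈ cs, x.1 ≤ acc.1) : cs.foldl pvStep2 acc = acc := by
  induction cs with
  | nil => rfl
  | cons c t ih =>
    have hc := h c List.mem_cons_self
    have hstep : pvStep2 acc c = acc := by unfold pvStep2; simp [not_lt.mpr hc]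
    rw [List.foldl_cons, hstep]
    exact ih (fun x hx => h x (List.mem_cons_of_mem _ hx))

-- with a global bound K attained, the fold returns the first element attaining K
theorem fold_first_max (cs : List (Int × Option Int)) (K : Int) (c : Int × Option Int)
    (hfind : cs.find? (fun x => x.1 == K) = some c)
    (hle : ∀ x ∈ cs, x.1 ≤ K) (acc : Int × Option Int) (hacc : acc.1 < K) :
    cs.foldl pvStep2 acc = c := by
  induction cs generalizing acc with
  | nil => simp at hfind
  | cons d t ih =>
    by_cases hd : d.1 = K
    · have hc : c = d := by
        simp [show (d.1 == K) = true from beq_iff_eq.mpr hd] at hfind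
        exact hfind.symm
      have hstep : pvStep2 acc d = d := by
        unfold pvStep2; simp [show acc.1 < d.1 by omega]
      rw [List.foldl_cons, hstep, hc]
      exact fold_stay t d (fun x hx => by have := hle x (List.mem_cons_of_mem _ hx); omega)
    · have hfind' : t.find? (fun x => x.1 == K) = some c := by
        simpa [List.find?_cons, show (d.1 == K) = false by simp [hd]] using hfind
      have hdK : d.1 < K := by
        have := hle d List.mem_cons_self; omega
      have hacc' : (pvStep2 acc d).1 < K := by
        unfold pvStep2; split <;> omega
      rw [List.foldl_cons]
      exact ih hfind' (fun x hx => hle x (List.mem_cons_of_mem _ hx)) _ hacc'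

-- B's descending probe loop computes A's best-match fold restricted to prefix lengths ≤ k
theorem descend_eq (m : String) (lst : List (String × Int)) :
    ∀ k : Nat, k ≤ m.toList.length →
    pvDescend lst m k =
      (let b := ((lst.filterMap (pvCand m)).filter
          (fun c => decide (c.1 ≤ (k : Int)))).foldl pvStep2 (-1, none);
       if b.1 ≥ 0 then b.2 else none) := by
  intro k
  induction k with
  | zero =>
    intro hk
    rcases hf : lst.find? (fun p => p.1 == pvKey m 0) with _ | pv
    · have hnone : (lst.filterMap (pvCand m)).find? (fun c => c.1 == ((0:Nat) : Int)) = none := by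
        rw [find?_corr m lst 0 hk, hf]; rfl
      have hne : ∀ c ∈ lst.filterMap (pvCand m), ¬ (c.1 = (0:Int)) := by
        intro c hc hceq
        have := List.find?_eq_none.mp hnone c hc
        simp [hceq] at this
      have hnil : (lst.filterMap (pvCand m)).filter (fun c => decide (c.1 ≤ ((0:Nat) : Int))) = [] := by
        rw [List.filter_eq_nil_iff]
        intro c hc
        rcases List.mem_filterMap.mp hc with ⟨pv, _, hpv⟩
        have h0 := cand_fst_nonneg m pv c hpv
        have := hne c hc
        simp; omega
      simp only [pvDescend, hf]
      rw [hnil]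
      rfl
    · have hsome : (lst.filterMap (pvCand m)).find? (fun c => c.1 == ((0:Nat) : Int))
          = some (((0:Nat) : Int), if pv.2 > 0 then some pv.2 else none) := by
        rw [find?_corr m lst 0 hk, hf]; rfl
      have hfiltfind : ((lst.filterMap (pvCand m)).filter
            (fun c => decide (c.1 ≤ ((0:Nat) : Int)))).find? (fun c => c.1 == ((0:Nat) : Int))
          = some (((0:Nat) : Int), if pv.2 > 0 then some pv.2 else none) := by
        rw [find?_filter_of_imp _ _ _ (fun x hx => by
          have : x.1 = ((0:Nat) : Int) := beq_iff_eq.mp hx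
          simp [this])]
        exact hsome
      have hle : ∀ x ∈ (lst.filterMap (pvCand m)).filter
          (fun c => decide (c.1 ≤ ((0:Nat) : Int))), x.1 ≤ ((0:Nat) : Int) := by
        intro x hx
        have := (List.mem_filter.mp hx).2
        simpa using this
      have hfold := fold_first_max _ _ _ hfiltfind hle (-1, none) (by simp)
      simp only [pvDescend, hf]
      rw [hfold]
      norm_num
    | succ k ih =>
      intro hk
      rcases hf : lst.find? (fun p => p.1 == pvKey m (k+1)) with _ | pv
      · have hnone : (lst.filterMap (pvCand m)).find? (fun c => c.1 == ((k+1:Nat) : Int)) = none := by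
          rw [find?_corr m lst (k+1) hk, hf]; rfl
        have hne : ∀ c ∈ lst.filterMap (pvCand m), ¬ (c.1 = ((k+1:Nat) : Int)) := by
          intro c hc hceq
          have := List.find?_eq_none.mp hnone c hc
          simp [hceq] at this
        have hcongr : (lst.filterMap (pvCand m)).filter (fun c => decide (c.1 ≤ ((k+1:Nat) : Int)))
            = (lst.filterMap (pvCand m)).filter (fun c => decide (c.1 ≤ ((k:Nat) : Int))) := by
          apply List.filter_congr
          intro c hc
          have h3 := hne c hc
          apply decide_eq_decide.mpr
          constructor <;> intro h4 <;> push_cast at * <;> omega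
        simp only [pvDescend, hf]
        rw [hcongr]
        exact ih (by omega)
      · have hsome : (lst.filterMap (pvCand m)).find? (fun c => c.1 == ((k+1:Nat) : Int))
            = some (((k+1:Nat) : Int), if pv.2 > 0 then some pv.2 else none) := by
          rw [find?_corr m lst (k+1) hk, hf]; rfl
        have hfiltfind : ((lst.filterMap (pvCand m)).filter
              (fun c => decide (c.1 ≤ ((k+1:Nat) : Int)))).find? (fun c => c.1 == ((k+1:Nat) : Int))
            = some (((k+1:Nat) : Int), if pv.2 > 0 then some pv.2 else none) := by
          rw [find?_filter_of_imp _ _ _ (fun x hx => by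
            have : x.1 = ((k+1:Nat) : Int) := beq_iff_eq.mp hx
            simp [this])]
          exact hsome
        have hle : ∀ x ∈ (lst.filterMap (pvCand m)).filter
            (fun c => decide (c.1 ≤ ((k+1:Nat) : Int))), x.1 ≤ ((k+1:Nat) : Int) := by
          intro x hx
          have := (List.mem_filter.mp hx).2
          simpa using this
        have hfold := fold_first_max _ _ _ hfiltfind hle (-1, none) (by show (-1:Int) < ((k+1:Nat) : Int); push_cast; omega)
        simp only [pvDescend, hf]
        rw [hfold]
        have hpos : ((k+1:Nat) : Int) ≥ 0 := by positivity
        simp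
        intro hlt
        exfalso
        omega

-- ===== VERDICT =====
theorem model_limit_py_spec : Claim_equal_model_limit_py := by
  intro limits model _
  unfold Spec_model_limit_py model_limit_py model_limit_py_alt
  match limits, model with
  | none, none => rfl
  | none, some _ => rfl
  | some _, none => rfl
  | some lst, some m =>
    by_cases hm : m = ""
    · simp [hm]
    · simp only [hm, if_false]
      rcases hex : (lst.find? (fun p => p.1 == m)).map Prod.snd with _ | ex
      · simp only [hex]
        rw [foldA_eq_fold_cands]
        have hall : (lst.filterMap (pvCand m)).filter
            (fun c => decide (c.1 ≤ ((m.toList.length : Nat) : Int))) = lst.filterMap (pvCand m) := by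
          rw [List.filter_eq_self]
          intro c hc
          rcases List.mem_filterMap.mp hc with ⟨pv, _, hpv⟩
          simpa using cand_fst_le m pv c hpv
        have hd := descend_eq m lst m.toList.length (le_refl _)
        rw [hall] at hd
        have hlen : (PySem.Str.len m).toNat = m.toList.length := by simp
        rw [hlen, hd]
      · simp only [hex]
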